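-- pv_equiv track=rewrite | github.com/artyomovs/adventofcode2021 | day7/day7.py | allign_by_position
-- ===== SOURCE A (Python) =====
-- def allign_by_position(coordinates, position, part=1):
--     cost = 0
--     for c in coordinates:
--         if part == 1:
--             cost = cost + abs(c - position)
--         if part == 2:
--             cost = cost + calculate_fuel_consumption_part_two(c, position)
--     return cost
--
-- def calculate_fuel_consumption_part_two(c1, c2):
--     sum = 0
--     for i in range(1, abs(c2 - c1) + 1):
--         sum = sum + i
--     return sum
-- ===== SOURCE B (Python) =====
-- def allign_by_position(coordinates, position, part=1):
--     if part == 1: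
--         return sum(abs(c - position) for c in coordinates)
--     if part == 2:
--         total = 0
--         for c in coordinates:
--             d = abs(c - position)
--             total += d * (d + 1) // 2
--         return total
--     return 0
-- ===== Notes on version B (the rewrite author's own statement) =====
-- stated objective: faster
-- what changed: Replaces the inner summing loop over range(1, d+1) with the closed-form triangular number d*(d+1)//2, and dispatches on part once instead of testing it for every coordinate.
import Mathlib
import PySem

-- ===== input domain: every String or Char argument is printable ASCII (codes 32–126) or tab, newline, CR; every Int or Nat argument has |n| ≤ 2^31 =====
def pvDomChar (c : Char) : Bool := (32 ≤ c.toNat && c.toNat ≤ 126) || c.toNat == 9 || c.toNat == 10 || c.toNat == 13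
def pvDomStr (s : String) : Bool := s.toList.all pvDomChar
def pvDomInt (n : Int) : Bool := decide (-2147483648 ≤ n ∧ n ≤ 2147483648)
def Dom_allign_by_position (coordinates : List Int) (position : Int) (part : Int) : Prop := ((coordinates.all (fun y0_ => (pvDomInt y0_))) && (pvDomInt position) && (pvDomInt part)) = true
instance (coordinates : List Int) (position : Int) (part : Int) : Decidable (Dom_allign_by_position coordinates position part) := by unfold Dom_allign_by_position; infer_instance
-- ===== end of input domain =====

-- B replaces A's inner summing loop over range(1, d+1) by the closed-form triangular number d*(d+1)//2
-- and dispatches on `part` once instead of per coordinate (objective: faster, O(n·maxDist) → O(n)).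


-- ===== PORT A =====
-- helper: calculate_fuel_consumption_part_two — sums 1..|c2-c1| with an explicit loop
def calculate_fuel_consumption_part_two (c1 c2 : Int) : Int :=
  (PySem.List.pyRange 1 (|c2 - c1| + 1) 1).foldl (fun sum i => sum + i) 0

def allign_by_position (coordinates : List Int) (position : Int) (part : Int) : Int :=
  coordinates.foldl (fun cost c =>
    let cost := if part == 1 then cost + |c - position| else cost
    if part == 2 then cost + calculate_fuel_consumption_part_two c position else cost) 0

-- ===== PORT B =====
def allign_by_position_alt (coordinates : List Int) (position : Int) (part : Int) : Int :=
  if part == 1 then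
    (coordinates.map (fun c => |c - position|)).sum
  else if part == 2 then
    coordinates.foldl (fun total c =>
      let d := |c - position|
      total + PySem.Int.floordiv (d * (d + 1)) 2) 0
  else 0

-- ===== PRECONDITION & SPEC =====
def Spec_allign_by_position (coordinates : List Int) (position : Int) (part : Int) (out : Int) : Prop := out = allign_by_position_alt coordinates position part
instance (coordinates : List Int) (position : Int) (part : Int) (out : Int) : Decidable (Spec_allign_by_position coordinates position part out) := by unfold Spec_allign_by_position; infer_instance

-- ===== CLAIM (what is proved, stated in full; the proofs are below) =====
def Claim_equal_allign_by_position : Prop := ∀ (coordinates : List Int) (position : Int) (part : Int), Dom_allign_by_position coordinates position part → Spec_allign_by_position coordinates position part (allign_by_position coordinates position part)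

-- ===== LEMMAS AND PROOFS =====

-- sum 1..n by loop equals the triangular closed form
theorem tri_nat (n : Nat) :
    (PySem.List.pyRange 1 ((n : Int) + 1) 1).foldl (fun sum i => sum + i) 0
      = PySem.Int.floordiv ((n : Int) * ((n : Int) + 1)) 2 := by
  induction n with
  | zero =>
    simp [PySem.List.pyRange_one_eq_nil, PySem.Int.floordiv]
  | succ k ih =>
    have h : PySem.List.pyRange 1 ((k : Int) + 1 + 1) 1
        = PySem.List.pyRange 1 ((k : Int) + 1) 1 ++ [(k : Int) + 1] :=
      PySem.List.pyRange_one_succ_right (by omega)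
    push_cast
    push_cast at ih
    rw [h, List.foldl_append, ih]
    simp only [List.foldl_cons, List.foldl_nil]
    rw [PySem.Int.floordiv_eq_ediv_of_pos (by omega), PySem.Int.floordiv_eq_ediv_of_pos (by omega)]
    obtain ⟨m, hm⟩ := Int.even_mul_succ_self (k : Int)
    have hd : ((k : Int) + 1) * ((k : Int) + 1 + 1) = (k : Int) * ((k : Int) + 1) + 2 * ((k : Int) + 1) := by ring
    omega

theorem tri_abs (d : Int) (hd : 0 ≤ d) :
    (PySem.List.pyRange 1 (d + 1) 1).foldl (fun sum i => sum + i) 0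
      = PySem.Int.floordiv (d * (d + 1)) 2 := by
  obtain ⟨n, rfl⟩ := Int.eq_ofNat_of_zero_le hd
  exact tri_nat n

theorem calc_eq (c position : Int) :
    calculate_fuel_consumption_part_two c position
      = PySem.Int.floordiv (|c - position| * (|c - position| + 1)) 2 := by
  unfold calculate_fuel_consumption_part_two
  rw [abs_sub_comm]
  exact tri_abs _ (abs_nonneg _)

-- ===== VERDICT (by name: the statement is the Claim_ definition above) =====
theorem allign_by_position_spec : Claim_equal_allign_by_position := by
  intro coordinates position part hdom
  clear hdom
  unfold Spec_allign_by_position allign_by_position allign_by_position_alt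
  by_cases h1 : part = 1
  · subst h1
    simp only [beq_self_eq_true, if_true, show ((1 : Int) == 2) = false by decide,
      Bool.false_eq_true, if_false]
    rw [List.sum_eq_foldl, List.foldl_map]
  · by_cases h2 : part = 2
    · subst h2
      simp only [show ((2 : Int) == 1) = false by decide,
        show ((2 : Int) == 2) = true by decide, Bool.false_eq_true, if_false, if_true]
      apply PySem.List.foldl_congr_mem
      intro acc x _
      rw [calc_eq]
    · simp only [beq_iff_eq, if_neg h1, if_neg h2]
      induction coordinates with
      | nil => rfl
      | cons c cs ih => exact ih
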